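-- pv_equiv track=rewrite | github.com/wh-jung0522/AlgorithmStudy | 2.Stack_Que/3_FunctionDevelop.py | spend_time_list2release_list
-- ===== SOURCE A (Python) =====
-- def spend_time_list2release_list(spend_time_list):
--     release_list = []
--     while(True):
--         release_order = 1
--         if (len(spend_time_list)==0):
--             break
--         task_day = spend_time_list[0]
--         while(True):
--             if(release_order >= len(spend_time_list)):
--                 release_list.append(release_order)
--                 for j in range(release_order):
--                     spend_time_list.pop(0)
--                 break
--             if(spend_time_list[release_order]>task_day):
--                 release_list.append(release_order)
--                 for j in range(release_order):
--                     spend_time_list.pop(0)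
--                 break
--             else:
--                 release_order += 1
--     return release_list
-- ===== SOURCE B (Python) =====
-- def spend_time_list2release_list(spend_time_list):
--     release_list = []
--     leader = 0
--     count = 0
--     for x in spend_time_list:
--         if count == 0:
--             leader, count = x, 1
--         elif not (x > leader):
--             count += 1
--         else:
--             release_list.append(count)
--             leader, count = x, 1
--     if count > 0:
--         release_list.append(count)
--     del spend_time_list[:]
--     return release_list
-- ===== Notes on version B (the rewrite author's own statement) =====
-- stated objective: faster
-- what changed: Replaced A's restart-from-scratch nested while loops with repeated pop(0) of each group by a single forward pass keeping a current group leader and a running count, appending the count when a larger element starts a new group.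
import Mathlib
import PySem

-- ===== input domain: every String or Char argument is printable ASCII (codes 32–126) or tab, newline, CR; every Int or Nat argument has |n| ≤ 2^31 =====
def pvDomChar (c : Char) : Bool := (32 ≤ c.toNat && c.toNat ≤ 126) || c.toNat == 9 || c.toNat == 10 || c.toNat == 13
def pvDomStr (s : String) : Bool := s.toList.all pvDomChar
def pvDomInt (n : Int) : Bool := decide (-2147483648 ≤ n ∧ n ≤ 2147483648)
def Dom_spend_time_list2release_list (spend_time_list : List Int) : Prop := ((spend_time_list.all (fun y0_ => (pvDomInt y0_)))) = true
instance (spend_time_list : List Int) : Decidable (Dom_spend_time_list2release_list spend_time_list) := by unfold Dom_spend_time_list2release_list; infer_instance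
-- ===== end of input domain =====

-- B replaces A's nested while loops (rescan + pop(0) per group) by one forward pass with a
-- group leader and a running count (objective: simpler). Both Pythons empty the argument list
-- in place; the equivalence proved here is about the return value.

-- ===== PORT A =====
-- A's inner while loop: starting after the group head with leader `t`, count how many
-- consecutive elements are not > t (release_order = 1 + this count).
def pvAScan (t : Int) : List Int → Nat
  | [] => 0
  | y :: ys => if y > t then 0 else 1 + pvAScan t ys

-- A's outer while loop: emit the group size, pop the group off the front, repeat.
def spend_time_list2release_list (spend_time_list : List Int) : List Int :=
  match spend_time_list with
  | [] => []
  | x :: xs =>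
    let c := pvAScan x xs
    ((1 + c : Nat) : Int) :: spend_time_list2release_list (xs.drop c)
termination_by spend_time_list.length
decreasing_by
  simp only [List.length_cons]
  exact Nat.lt_succ_of_le (List.length_drop (l := xs) (i := c) ▸ Nat.sub_le _ _)

-- ===== PORT B =====
def pvBStep (s : List Int × Int × Int) (x : Int) : List Int × Int × Int :=
  let (acc, leader, count) := s
  if count == 0 then (acc, x, 1)
  else if ¬ (x > leader) then (acc, leader, count + 1)
  else (acc ++ [count], x, 1)

def spend_time_list2release_list_alt (spend_time_list : List Int) : List Int :=
  let st := spend_time_list.foldl pvBStep ([], 0, 0)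
  if st.2.2 > 0 then st.1 ++ [st.2.2] else st.1

-- ===== PRECONDITION & SPEC =====
def Spec_spend_time_list2release_list (spend_time_list : List Int) (out : List Int) : Prop := out = spend_time_list2release_list_alt spend_time_list
instance (spend_time_list : List Int) (out : List Int) : Decidable (Spec_spend_time_list2release_list spend_time_list out) := by unfold Spec_spend_time_list2release_list; infer_instance

-- ===== CLAIM (what is proved, stated in full; the proofs are below) =====
def Claim_equal_spend_time_list2release_list : Prop := ∀ (spend_time_list : List Int), Dom_spend_time_list2release_list spend_time_list → Spec_spend_time_list2release_list spend_time_list (spend_time_list2release_list spend_time_list)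

-- ===== LEMMAS AND PROOFS =====

-- sizes emitted by B from an open group with leader t and positive count k
def pvG (t : Int) (k : Int) : List Int → List Int
  | [] => [k]
  | y :: ys => if y > t then k :: pvG y 1 ys else pvG t (k + 1) ys

-- B's fold, once a group is open (count > 0), produces acc ++ pvG
theorem pvB_run (l : List Int) : ∀ (acc : List Int) (t : Int) (k : Int), 0 < k →
    (let st := l.foldl pvBStep (acc, t, k);
     if st.2.2 > 0 then st.1 ++ [st.2.2] else st.1) = acc ++ pvG t k l := by
  induction l with
  | nil =>
    intro acc t k hk
    simp [pvG, hk]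
  | cons y ys ih =>
    intro acc t k hk
    have hk0 : ¬ ((k == 0) = true) := by simp; omega
    simp only [List.foldl_cons]
    by_cases h : y > t
    · have hstep : pvBStep (acc, t, k) y = (acc ++ [k], y, 1) := by
        simp only [pvBStep, if_neg hk0, if_neg (not_not_intro h)]
      rw [hstep]
      have := ih (acc ++ [k]) y 1 Int.one_pos
      simp only [this, pvG, if_pos h, List.append_assoc, List.singleton_append]
    · have hstep : pvBStep (acc, t, k) y = (acc, t, k + 1) := by
        simp only [pvBStep, if_neg hk0, if_pos h]
      rw [hstep]
      have := ih acc t (k + 1) (by omega)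
      simp only [this, pvG, if_neg h]

-- pvG unfolds one whole group at a time, consuming pvAScan-many elements
theorem pvG_scan (l : List Int) : ∀ (t : Int) (k : Int),
    pvG t k l = (k + (pvAScan t l : Int)) ::
      (match l.drop (pvAScan t l) with
       | [] => []
       | y :: ys => pvG y 1 ys) := by
  induction l with
  | nil => intro t k; unfold pvG pvAScan; simp
  | cons y ys ih =>
    intro t k
    by_cases h : y > t
    · simp [pvG, pvAScan, h]
    · simp only [pvG, pvAScan, if_neg h]
      rw [ih t (k + 1)]
      simp only [Nat.add_comm 1 (pvAScan t ys), List.drop_succ_cons]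
      congr 1
      push_cast
      ring

theorem pvA_eq_tail (n : Nat) : ∀ (l : List Int), l.length ≤ n →
    spend_time_list2release_list l =
      (match l with | [] => [] | y :: ys => pvG y 1 ys) := by
  induction n with
  | zero =>
    intro l hl
    match l with
    | [] => simp [spend_time_list2release_list]
    | _ :: _ => simp at hl
  | succ n ih =>
    intro l hl
    match l with
    | [] => simp [spend_time_list2release_list]
    | x :: xs =>
      rw [spend_time_list2release_list]
      have hx : (xs.drop (pvAScan x xs)).length ≤ n := by
        have := List.length_drop (l := xs) (i := pvAScan x xs)
        simp at hl
        omega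
      rw [ih _ hx]
      show _ = pvG x 1 xs
      rw [pvG_scan xs x 1]
      congr 1

-- ===== VERDICT (by name: the statement is the Claim_ definition above) =====
theorem spend_time_list2release_list_spec : Claim_equal_spend_time_list2release_list := by
  intro l _
  unfold Spec_spend_time_list2release_list spend_time_list2release_list_alt
  match l with
  | [] => simp [spend_time_list2release_list]
  | x :: xs =>
    have hB := pvB_run xs [] x 1 (by omega)
    simp only [List.foldl_cons, pvBStep, if_pos (by simp : ((0:Int) == 0) = true)]
    rw [hB, pvA_eq_tail (x :: xs).length (x :: xs) (le_refl _)]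
    simp
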